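-- pv_equiv track=rewrite | github.com/JamiesZhang/ClinicalTrials | TermExt/termExtension.py | parse_entryterms
-- ===== SOURCE A (Python) =====
-- def parse_entryterms(split_text):
--     entry_terms = []
--     start = False
--     for line in split_text:
--         if line.strip() == 'Entry Terms:':
--             start = True
--             continue
--         if start:
--             if line.strip() == '':
--                 break
--             else:
--                 entry_terms.append(line.strip())
--     return entry_terms, start
-- ===== SOURCE B (Python) =====
-- def parse_entryterms(split_text):
--     # Index/slice pipeline: strip everything once, locate the header by .index,
--     # cut the tail at the first blank line, and filter out repeated headers.
--     stripped = [line.strip() for line in split_text]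
--     if 'Entry Terms:' not in stripped:
--         return [], False
--     tail = stripped[stripped.index('Entry Terms:') + 1:]
--     cut = tail.index('') if '' in tail else len(tail)
--     return [s for s in tail[:cut] if s != 'Entry Terms:'], True
-- ===== Notes on version B (the rewrite author's own statement) =====
-- stated objective: simpler
-- what changed: Replaces A's stateful flag-and-accumulator loop by a loop-free index/slice pipeline: strip all lines once, locate the header with list.index, slice the tail, cut it at the first blank line's index, and keep non-header lines with a filtering comprehension.
import Mathlib
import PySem

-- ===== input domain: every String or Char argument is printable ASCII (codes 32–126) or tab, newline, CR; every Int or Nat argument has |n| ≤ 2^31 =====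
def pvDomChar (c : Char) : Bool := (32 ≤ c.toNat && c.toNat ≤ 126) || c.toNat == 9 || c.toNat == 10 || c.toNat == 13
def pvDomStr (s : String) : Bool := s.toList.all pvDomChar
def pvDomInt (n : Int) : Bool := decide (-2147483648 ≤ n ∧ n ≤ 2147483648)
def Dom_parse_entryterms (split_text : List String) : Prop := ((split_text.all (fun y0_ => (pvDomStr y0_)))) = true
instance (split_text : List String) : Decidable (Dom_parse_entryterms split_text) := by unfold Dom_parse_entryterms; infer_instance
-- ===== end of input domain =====

-- B replaces A's stateful flag-and-accumulator loop by a loop-free index/slice pipeline; objective: simpler. Return values only; neither mutates.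

-- ===== PORT A =====
-- A's single for-loop with accumulator entry_terms, flag start, and break (break = return current state).
def pvGoA (lines : List String) (entry_terms : List String) (start : Bool) : List String × Bool :=
  match lines with
  | [] => (entry_terms, start)
  | line :: rest =>
    if PySem.Str.strip line = "Entry Terms:" then
      pvGoA rest entry_terms true
    else if start then
      if PySem.Str.strip line = "" then (entry_terms, start)
      else pvGoA rest (entry_terms ++ [PySem.Str.strip line]) start
    else
      pvGoA rest entry_terms start

def parse_entryterms (split_text : List String) : List String × Bool :=
  pvGoA split_text [] false

-- ===== PORT B =====
-- Source B: stripped = [line.strip() for line in split_text]; membership + .index on it;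
-- tail = stripped[i+1:]; cut = tail.index('') if '' in tail else len(tail);
-- result = [s for s in tail[:cut] if s != 'Entry Terms:'].
def parse_entryterms_alt (split_text : List String) : List String × Bool :=
  let stripped := split_text.map PySem.Str.strip
  match PySem.List.index? stripped "Entry Terms:" with
  | none => ([], false)          -- 'Entry Terms:' not in stripped
  | some i =>
    let tail := PySem.List.slice stripped (some ((i : Int) + 1)) none
    let cut := (PySem.List.index? tail "").getD tail.length
    ((tail.take cut).filter (fun s => s ≠ "Entry Terms:"), true)

-- ===== PRECONDITION & SPEC =====
def Spec_parse_entryterms (split_text : List String) (out : List String × Bool) : Prop := out = parse_entryterms_alt split_text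
instance (split_text : List String) (out : List String × Bool) : Decidable (Spec_parse_entryterms split_text out) := by unfold Spec_parse_entryterms; infer_instance

-- ===== CLAIM (what is proved, stated in full; the proofs are below) =====
def Claim_equal_parse_entryterms : Prop := ∀ (split_text : List String), Dom_parse_entryterms split_text → Spec_parse_entryterms split_text (parse_entryterms split_text)

-- ===== LEMMAS AND PROOFS =====

-- B's tail computation, as a function of the already-stripped tail (proof-only helper).
def pvCut (tl : List String) : List String :=
  (tl.take ((PySem.List.index? tl "").getD tl.length)).filter (fun s => s ≠ "Entry Terms:")

theorem pvCut_nil : pvCut [] = [] := by simp [pvCut]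

theorem pvCut_cons_blank (tl : List String) : pvCut ("" :: tl) = [] := by
  rw [pvCut, PySem.List.index?_cons_self]
  simp

theorem pvCut_cons_ne (s : String) (tl : List String) (h : s ≠ "") :
    pvCut (s :: tl) = (if s = "Entry Terms:" then [] else [s]) ++ pvCut tl := by
  rw [pvCut, pvCut, PySem.List.index?_cons_of_ne tl h]
  cases hidx : PySem.List.index? tl "" with
  | none =>
    simp only [Option.map_none, Option.getD_none, List.length_cons,
      List.take_succ_cons, List.filter_cons]
    split_ifs <;> simp_all
  | some j =>
    simp only [Option.map_some, Option.getD_some, List.take_succ_cons, List.filter_cons]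
    split_ifs <;> simp_all

-- A's loop with start = true computes terms ++ pvCut (stripped remainder).
theorem pvGoA_true (lines : List String) (terms : List String) :
    pvGoA lines terms true = (terms ++ pvCut (lines.map PySem.Str.strip), true) := by
  induction lines generalizing terms with
  | nil => simp [pvGoA, pvCut_nil]
  | cons l rest ih =>
    simp only [pvGoA, List.map_cons]
    by_cases h1 : PySem.Str.strip l = "Entry Terms:"
    · rw [if_pos h1, ih, h1, pvCut_cons_ne _ _ (by decide)]
      simp
    · rw [if_neg h1]
      by_cases h2 : PySem.Str.strip l = ""
      · simp [h2, pvCut_cons_blank]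
      · rw [if_pos trivial, if_neg h2, ih, pvCut_cons_ne _ _ h2, if_neg h1]
        simp

-- B's pipeline ignores non-header lines before the header.
theorem pvAlt_cons_ne (l : String) (rest : List String)
    (h1 : PySem.Str.strip l ≠ "Entry Terms:") :
    parse_entryterms_alt (l :: rest) = parse_entryterms_alt rest := by
  unfold parse_entryterms_alt
  simp only [List.map_cons]
  rw [PySem.List.index?_cons_of_ne (rest.map PySem.Str.strip) h1]
  cases hidx : PySem.List.index? (rest.map PySem.Str.strip) "Entry Terms:" with
  | none => simp only [Option.map_none]
  | some j =>
    simp only [Option.map_some]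
    have e2 : ((j : Nat) : Int) + 1 = ((j + 1 : Nat) : Int) := by omega
    have e1 : ((j + 1 : Nat) : Int) + 1 = ((j + 2 : Nat) : Int) := by omega
    rw [e1, e2, PySem.List.slice_from_natCast, PySem.List.slice_from_natCast]
    simp [List.drop_succ_cons]

-- A's loop with start = false equals B's pipeline.
theorem pvGoA_false (lines : List String) :
    pvGoA lines [] false = parse_entryterms_alt lines := by
  induction lines with
  | nil => simp [pvGoA, parse_entryterms_alt]
  | cons l rest ih =>
    by_cases h1 : PySem.Str.strip l = "Entry Terms:"
    · simp only [pvGoA, if_pos h1]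
      rw [pvGoA_true]
      unfold parse_entryterms_alt
      simp only [List.map_cons, h1, PySem.List.index?_cons_self]
      have e0 : ((0 : Nat) : Int) + 1 = ((1 : Nat) : Int) := by omega
      rw [e0, PySem.List.slice_from_natCast]
      simp [pvCut]
    · simp only [pvGoA, if_neg h1, Bool.false_eq_true, if_false]
      rw [ih, pvAlt_cons_ne l rest h1]

-- ===== VERDICT (by name: the statement is the Claim_ definition above) =====
theorem parse_entryterms_spec : Claim_equal_parse_entryterms := by
  intro split_text _
  unfold Spec_parse_entryterms parse_entryterms
  exact pvGoA_false split_text
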